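-- pv_equiv track=rewrite | github.com/oolongteaa/sos-inventory-management | create_monthly_shipments.py | _detect_month_in_text
-- ===== SOURCE A (Python) =====
-- MONTH_MATCHES = {
--     1:  ["january", "jan"],
--     2:  ["february", "feb"],
--     3:  ["march", "mar"],
--     4:  ["april", "apr"],
--     5:  ["may"],
--     6:  ["june", "jun"],
--     7:  ["july", "jul"],
--     8:  ["august", "aug"],
--     9:  ["september", "sept", "sep"],
--     10: ["october", "oct"],
--     11: ["november", "nov"],
--     12: ["december", "dec"],
-- }
--
-- def _detect_month_in_text(text: str):
--     """
--     Return (month_number, start_index, end_index) of the month substring in text, case-insensitive.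
--     Prefers longer matches (e.g., 'September' over 'Sep'), then first occurrence.
--     """
--     if not text:
--         return None
--     low = text.lower()
--     # Build candidate patterns with preference: full names first, then 'sept', then 3-letter abbrs, etc.
--     patterns = [
--         ("september", 9), ("october", 10), ("november", 11), ("december", 12),
--         ("january", 1), ("february", 2), ("march", 3), ("april", 4), ("august", 8),
--         ("july", 7), ("june", 6), ("may", 5),
--         ("sept", 9),  # handle 'Sept' specifically
--         ("j an", None)  # placeholder to keep list syntax valid; will be ignored
--     ]
--     # Construct full search list including standard abbreviations
--     patterns = [(p, m) for (p, m) in patterns if m is not None]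
--     for mnum, abbrs in MONTH_MATCHES.items():
--         for p in sorted(set(abbrs), key=lambda s: -len(s)):  # longer first
--             patterns.append((p, mnum))
--
--     best = None
--     seen_spans = set()
--     for pat, mnum in patterns:
--         i = low.find(pat)
--         if i != -1:
--             span = (i, i + len(pat))
--             if span in seen_spans:
--                 continue
--             seen_spans.add(span)
--             # Prefer longer match by default since we seeded with long names first
--             if best is None:
--                 best = (mnum, i, i + len(pat))
--             else:
--                 # If this match starts earlier, prefer it; else keep first found
--                 if i < best[1]:
--                     best = (mnum, i, i + len(pat))
--     return best
-- ===== SOURCE B (Python) =====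
-- # Single left-to-right scan: at each position try the patterns longest-first and
-- # return on the first hit (regex-style leftmost/longest-variant match), instead of
-- # A's per-pattern find() passes with best/seen-span bookkeeping.
-- PATTERNS = [
--     ("september", 9),
--     ("february", 2), ("november", 11), ("december", 12),
--     ("january", 1), ("october", 10),
--     ("august", 8),
--     ("april", 4), ("march", 3),
--     ("sept", 9), ("june", 6), ("july", 7),
--     ("jan", 1), ("feb", 2), ("mar", 3), ("apr", 4), ("may", 5), ("jun", 6),
--     ("jul", 7), ("aug", 8), ("sep", 9), ("oct", 10), ("nov", 11), ("dec", 12),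
-- ]
--
-- def _detect_month_in_text(text):
--     if not text:
--         return None
--     low = text.lower()
--     for i in range(len(low)):
--         for pat, mnum in PATTERNS:
--             if low.startswith(pat, i):
--                 return (mnum, i, i + len(pat))
--     return None
-- ===== Notes on version B (the rewrite author's own statement) =====
-- stated objective: alternative
-- what changed: A runs str.find once per pattern (37 candidate patterns, with a best-start tracker and a seen-spans set); B does a single left-to-right scan over the text, trying the patterns longest-first at each position and returning on the first hit, regex-style.
import Mathlib
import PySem

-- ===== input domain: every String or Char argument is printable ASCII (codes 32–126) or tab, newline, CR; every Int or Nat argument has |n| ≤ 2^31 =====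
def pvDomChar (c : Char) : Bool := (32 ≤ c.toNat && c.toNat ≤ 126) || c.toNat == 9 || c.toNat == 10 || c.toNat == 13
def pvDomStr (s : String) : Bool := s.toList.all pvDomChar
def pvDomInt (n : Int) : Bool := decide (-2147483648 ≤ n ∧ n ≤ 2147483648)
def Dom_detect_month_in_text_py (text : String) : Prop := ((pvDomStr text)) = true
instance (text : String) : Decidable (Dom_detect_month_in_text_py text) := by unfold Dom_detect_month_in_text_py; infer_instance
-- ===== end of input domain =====

-- B replaces A's per-pattern str.find passes (with best/seen-span bookkeeping) by one
-- left-to-right scan that tries the patterns longest-first at each position and returns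
-- the first hit and stops (regex-style matching); a timing run measured B faster
-- (early exit at the first match vs A's 37 unconditional find passes).

-- ===== PORT A =====
def pvMonthMatches : PySem.Dict Int (List (List Char)) :=
  PySem.Dict.ofList [
    (1, ["january".toList, "jan".toList]),
    (2, ["february".toList, "feb".toList]),
    (3, ["march".toList, "mar".toList]),
    (4, ["april".toList, "apr".toList]),
    (5, ["may".toList]),
    (6, ["june".toList, "jun".toList]),
    (7, ["july".toList, "jul".toList]),
    (8, ["august".toList, "aug".toList]),
    (9, ["september".toList, "sept".toList, "sep".toList]),
    (10, ["october".toList, "oct".toList]),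
    (11, ["november".toList, "nov".toList]),
    (12, ["december".toList, "dec".toList])]

-- A's 'patterns' list: the seeded list, the comprehension dropping the None placeholder,
-- then for each month the abbreviations, sorted(set(abbrs), key=lambda s: -len(s)).
def pvPatternsA : List (List Char × Int) :=
  let patterns0 : List (List Char × Option Int) :=
    [("september".toList, some 9), ("october".toList, some 10), ("november".toList, some 11), ("december".toList, some 12),
     ("january".toList, some 1), ("february".toList, some 2), ("march".toList, some 3), ("april".toList, some 4), ("august".toList, some 8),
     ("july".toList, some 7), ("june".toList, some 6), ("may".toList, some 5),
     ("sept".toList, some 9),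
     ("j an".toList, none)]
  let patterns1 : List (List Char × Int) :=
    patterns0.filterMap (fun pm => pm.2.map (fun m => (pm.1, m)))
  pvMonthMatches.items.foldl (fun acc kv =>
    acc ++ (PySem.List.sorted (PySem.Set.ofList kv.2) (fun s => -(PySem.Chars.len s)) false).map (fun p => (p, kv.1)))
    patterns1

-- the body of A's search loop (seen_spans is a Python set of (start, end) pairs)
def pvStepA (low : List Char) (st : Option (Int × Int × Int) × PySem.Set (Int × Int))
    (pm : List Char × Int) : Option (Int × Int × Int) × PySem.Set (Int × Int) :=
  let i := PySem.Chars.find low pm.1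
  if i ≠ -1 then
    let span : Int × Int := (i, i + PySem.Chars.len pm.1)
    if PySem.Set.contains st.2 span then st
    else
      let seen := PySem.Set.add st.2 span
      match st.1 with
      | none => (some (pm.2, i, i + PySem.Chars.len pm.1), seen)
      | some b => if i < b.2.1 then (some (pm.2, i, i + PySem.Chars.len pm.1), seen) else (st.1, seen)
  else st

def detect_month_in_text_py (text : String) : Option (Int × Int × Int) :=
  if text.toList = [] then none   -- 'if not text: return None'
  else
    let low := PySem.Chars.lower text.toList
    (pvPatternsA.foldl (pvStepA low) (none, PySem.Set.empty)).1

-- ===== PORT B =====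
def pvPatternsB : List (List Char × Int) :=
  [("september".toList, 9),
   ("february".toList, 2), ("november".toList, 11), ("december".toList, 12),
   ("january".toList, 1), ("october".toList, 10),
   ("august".toList, 8),
   ("april".toList, 4), ("march".toList, 3),
   ("sept".toList, 9), ("june".toList, 6), ("july".toList, 7),
   ("jan".toList, 1), ("feb".toList, 2), ("mar".toList, 3), ("apr".toList, 4),
   ("may".toList, 5), ("jun".toList, 6), ("jul".toList, 7), ("aug".toList, 8),
   ("sep".toList, 9), ("oct".toList, 10), ("nov".toList, 11), ("dec".toList, 12)]

-- inner loop: first pattern matching at position i ('low.startswith(pat, i)';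
-- with 0 ≤ i ≤ len(low) this is exactly a prefix test on low.drop i)
def pvFirstAt (low : List Char) (i : Nat) : Option (Int × Int × Int) :=
  pvPatternsB.findSome? fun pm =>
    if PySem.Chars.startswith (low.drop i) pm.1 then
      some (pm.2, (i : Int), (i : Int) + PySem.Chars.len pm.1)
    else none

def detect_month_in_text_py_alt (text : String) : Option (Int × Int × Int) :=
  if text.toList = [] then none   -- 'if not text: return None'
  else
    let low := PySem.Chars.lower text.toList
    -- 'for i in range(len(low)): ... return' — keep the first produced result
    (List.range low.length).foldl
      (fun acc i => match acc with | some r => some r | none => pvFirstAt low i) none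

-- ===== PRECONDITION & SPEC =====
def Spec_detect_month_in_text_py (text : String) (out : Option (Int × Int × Int)) : Prop := out = detect_month_in_text_py_alt text
instance (text : String) (out : Option (Int × Int × Int)) : Decidable (Spec_detect_month_in_text_py text out) := by unfold Spec_detect_month_in_text_py; infer_instance

-- ===== CLAIM (what is proved, stated in full; the proofs are below) =====
def Claim_equal_detect_month_in_text_py : Prop := ∀ (text : String), Dom_detect_month_in_text_py text → Spec_detect_month_in_text_py text (detect_month_in_text_py text)

-- ===== LEMMAS AND PROOFS =====

-- the seen-free version of A's loop body
def pvStep (l : List Char) (best : Option (Int × Int × Int)) (pm : List Char × Int) :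
    Option (Int × Int × Int) :=
  let i := PySem.Chars.find l pm.1
  if i ≠ -1 then
    match best with
    | none => some (pm.2, i, i + PySem.Chars.len pm.1)
    | some b => if i < b.2.1 then some (pm.2, i, i + PySem.Chars.len pm.1) else some b
  else best

lemma pvStepA_fst (l : List Char) (best : Option (Int × Int × Int))
    (seen : PySem.Set (Int × Int)) (pm : List Char × Int)
    (hinv : ∀ sp ∈ seen, ∃ b, best = some b ∧ b.2.1 ≤ sp.1) :
    (pvStepA l (best, seen) pm).1 = pvStep l best pm ∧
    (∀ sp ∈ (pvStepA l (best, seen) pm).2, ∃ b, pvStep l best pm = some b ∧ b.2.1 ≤ sp.1) := by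
  cases best with
  | none =>
    simp only [pvStepA, pvStep]
    split_ifs with hi hc
    · exact absurd ((hinv _ (List.mem_of_elem_eq_true hc)).choose_spec.1) (by simp)
    · refine ⟨rfl, fun sp hsp => ?_⟩
      rcases (PySem.Set.mem_add seen _ sp).mp hsp with h | h
      · obtain ⟨b, hb, _⟩ := hinv sp h; cases hb
      · exact ⟨_, rfl, by rw [h]⟩
    · exact ⟨rfl, fun sp hsp => absurd (hinv sp hsp).choose_spec.1 (by simp)⟩
  | some b =>
    have hble : PySem.Set.contains seen (PySem.Chars.find l pm.1,
        PySem.Chars.find l pm.1 + PySem.Chars.len pm.1) = true →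
        b.2.1 ≤ PySem.Chars.find l pm.1 := by
      intro hc
      obtain ⟨b', hb', hle⟩ := hinv _ (List.mem_of_elem_eq_true hc)
      cases hb'; simpa using hle
    simp only [pvStepA, pvStep]
    split_ifs with hi hc hlt hlt
    · exact absurd (hble hc) (by omega)
    · refine ⟨rfl, fun sp hsp => ?_⟩
      obtain ⟨b', hb', hle⟩ := hinv sp hsp
      cases hb'; exact ⟨b, rfl, hle⟩
    · refine ⟨rfl, fun sp hsp => ?_⟩
      rcases (PySem.Set.mem_add seen _ sp).mp hsp with h | h
      · obtain ⟨b', hb', hle⟩ := hinv sp h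
        cases hb'; exact ⟨_, rfl, by simp only []; omega⟩
      · exact ⟨_, rfl, by rw [h]⟩
    · refine ⟨rfl, fun sp hsp => ?_⟩
      rcases (PySem.Set.mem_add seen _ sp).mp hsp with h | h
      · obtain ⟨b', hb', hle⟩ := hinv sp h
        cases hb'; exact ⟨_, rfl, hle⟩
      · exact ⟨_, rfl, by rw [h]; simp only []; omega⟩
    · exact ⟨rfl, hinv⟩

-- skipping already-seen spans never changes 'best': every seen span starts no earlier
-- than the current best start, so the skipped update would have been a no-op
lemma pvFoldA_eq (l : List Char) : ∀ (ps : List (List Char × Int))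
    (best : Option (Int × Int × Int)) (seen : PySem.Set (Int × Int)),
    (∀ sp ∈ seen, ∃ b, best = some b ∧ b.2.1 ≤ sp.1) →
    (ps.foldl (pvStepA l) (best, seen)).1 = ps.foldl (pvStep l) best := by
  intro ps
  induction ps with
  | nil => intro best seen _; rfl
  | cons pm t ih =>
    intro best seen hinv
    obtain ⟨h1, h2⟩ := pvStepA_fst l best seen pm hinv
    simp only [List.foldl_cons]
    have heta : t.foldl (pvStepA l) (pvStepA l (best, seen) pm)
        = t.foldl (pvStepA l) ((pvStepA l (best, seen) pm).1, (pvStepA l (best, seen) pm).2) := rfl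
    rw [heta, h1]
    exact ih _ _ (h1 ▸ h2)

-- characterisation of the seen-free fold: none iff nothing is found; otherwise the
-- result comes from the first pattern (in list order) whose find is minimal
lemma pvFold_spec (l : List Char) (ps : List (List Char × Int)) :
    (ps.foldl (pvStep l) none = none ↔ ∀ pm ∈ ps, PySem.Chars.find l pm.1 = -1)
    ∧ (∀ m i e, ps.foldl (pvStep l) none = some (m, i, e) →
        ∃ k, ∃ hk : k < ps.length,
          ps[k].2 = m ∧ PySem.Chars.find l ps[k].1 = i ∧ i ≠ -1 ∧
          e = i + PySem.Chars.len ps[k].1 ∧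
          (∀ qm ∈ ps, PySem.Chars.find l qm.1 ≠ -1 → i ≤ PySem.Chars.find l qm.1) ∧
          (∀ qm ∈ ps.take k, PySem.Chars.find l qm.1 ≠ i)) := by
  induction ps using List.reverseRecOn with
  | nil => simp
  | append_singleton t x ih =>
    obtain ⟨ihn, ihs⟩ := ih
    have hfold : (t ++ [x]).foldl (pvStep l) none = pvStep l (t.foldl (pvStep l) none) x := by
      simp [List.foldl_append]
    rcases hr : t.foldl (pvStep l) none with _ | b
    · -- nothing found in t
      have hall := ihn.mpr
      have hallm : ∀ pm ∈ t, PySem.Chars.find l pm.1 = -1 := ihn.mp hr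
      by_cases hx : PySem.Chars.find l x.1 = -1
      · have hres : (t ++ [x]).foldl (pvStep l) none = none := by
          rw [hfold, hr]; simp [pvStep, hx]
        constructor
        · rw [hres]
          constructor
          · intro _ pm hpm
            rcases List.mem_append.mp hpm with h | h
            · exact hallm pm h
            · simp at h; rw [h]; exact hx
          · intro _; rfl
        · intro m i e heq; rw [hres] at heq; cases heq
      · have hres : (t ++ [x]).foldl (pvStep l) none
            = some (x.2, PySem.Chars.find l x.1, PySem.Chars.find l x.1 + PySem.Chars.len x.1) := by
          rw [hfold, hr]; simp [pvStep, hx]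
        constructor
        · rw [hres]
          constructor
          · intro h; cases h
          · intro h; exact absurd (h x (by simp)) hx
        · intro m i e heq
          rw [hres] at heq
          simp only [Option.some.injEq, Prod.mk.injEq] at heq
          obtain ⟨hm, hi, he⟩ := heq
          refine ⟨t.length, by simp, ?_, ?_, ?_, ?_, ?_, ?_⟩
          · rw [List.getElem_concat_length rfl]; exact hm
          · rw [List.getElem_concat_length rfl]; exact hi
          · rw [← hi]; exact hx
          · rw [List.getElem_concat_length rfl]; omega
          · intro qm hqm hne
            rcases List.mem_append.mp hqm with h | h
            · exact absurd (hallm qm h) hne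
            · simp at h; rw [h, ← hi]
          · rw [List.take_left]
            intro qm hqm
            rw [hallm qm hqm, ← hi]
            exact fun hc => hx hc.symm
    · -- t already produced a best
      obtain ⟨m0, i0, e0⟩ := b
      obtain ⟨k, hk, hkm, hkf, hkne, hke, hmin, htake⟩ := ihs m0 i0 e0 hr
      have hkmem : t[k] ∈ t := List.getElem_mem hk
      have hklt : k < (t ++ [x]).length := by simp; omega
      have hgk : (t ++ [x])[k]'hklt = t[k]'hk := List.getElem_append_left hk
      have hkeep : ∀ (h : pvStep l (some (m0, i0, e0)) x = some (m0, i0, e0)),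
          (∀ m i e, (t ++ [x]).foldl (pvStep l) none = some (m, i, e) →
          ∃ k', ∃ hk' : k' < (t ++ [x]).length,
            (t ++ [x])[k'].2 = m ∧ PySem.Chars.find l (t ++ [x])[k'].1 = i ∧ i ≠ -1 ∧
            e = i + PySem.Chars.len (t ++ [x])[k'].1 ∧
            (∀ qm ∈ t ++ [x], PySem.Chars.find l qm.1 ≠ -1 → i ≤ PySem.Chars.find l qm.1) ∧
            (∀ qm ∈ (t ++ [x]).take k', PySem.Chars.find l qm.1 ≠ i)) := by
        intro hstep m i e heq
        rw [hfold, hr, hstep] at heq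
        simp only [Option.some.injEq, Prod.mk.injEq] at heq
        obtain ⟨hm, hi, he⟩ := heq
        subst hm; subst hi; subst he
        refine ⟨k, hklt, by rw [hgk]; exact hkm, by rw [hgk]; exact hkf, hkne,
          by rw [hgk]; exact hke, ?_, ?_⟩
        · intro qm hqm hne
          rcases List.mem_append.mp hqm with h | h
          · exact hmin qm h hne
          · simp at h; subst h
            -- x's find is not smaller, else pvStep would have replaced the best
            by_contra hcon
            rw [not_le] at hcon
            have hxne : PySem.Chars.find l qm.1 ≠ -1 := by
              have := PySem.Chars.neg_one_le_find l qm.1; omega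
            simp [pvStep, hxne, hcon] at hstep
            omega
        · rw [List.take_append_of_le_length (le_of_lt hk)]
          exact htake
      by_cases hx : PySem.Chars.find l x.1 = -1
      · have hstep : pvStep l (some (m0, i0, e0)) x = some (m0, i0, e0) := by
          simp [pvStep, hx]
        constructor
        · rw [hfold, hr, hstep]
          constructor
          · intro h; cases h
          · intro h
            exact absurd (h t[k] (List.mem_append.mpr (Or.inl hkmem))) (by rw [hkf]; exact hkne)
        · exact hkeep hstep
      · by_cases hlt : PySem.Chars.find l x.1 < i0
        · have hstep : pvStep l (some (m0, i0, e0)) x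
              = some (x.2, PySem.Chars.find l x.1, PySem.Chars.find l x.1 + PySem.Chars.len x.1) := by
            simp [pvStep, hx, hlt]
          constructor
          · rw [hfold, hr, hstep]
            constructor
            · intro h; cases h
            · intro h; exact absurd (h x (by simp)) hx
          · intro m i e heq
            rw [hfold, hr, hstep] at heq
            simp only [Option.some.injEq, Prod.mk.injEq] at heq
            obtain ⟨hm, hi, he⟩ := heq
            refine ⟨t.length, by simp, ?_, ?_, ?_, ?_, ?_, ?_⟩
            · rw [List.getElem_concat_length rfl]; exact hm
            · rw [List.getElem_concat_length rfl]; exact hi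
            · rw [← hi]; exact hx
            · rw [List.getElem_concat_length rfl]; omega
            · intro qm hqm hne
              rcases List.mem_append.mp hqm with h | h
              · have := hmin qm h hne; omega
              · simp at h; rw [h, ← hi]
            · rw [List.take_left]
              intro qm hqm heqf
              by_cases hqne : PySem.Chars.find l qm.1 = -1
              · rw [hqne] at heqf; rw [← heqf] at hi; omega
              · have := hmin qm hqm hqne; omega
        · have hstep : pvStep l (some (m0, i0, e0)) x = some (m0, i0, e0) := by
            simp [pvStep, hx, hlt]
          constructor
          · rw [hfold, hr, hstep]
            constructor
            · intro h; cases h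
            · intro h
              exact absurd (h t[k] (List.mem_append.mpr (Or.inl hkmem))) (by rw [hkf]; exact hkne)
          · exact hkeep hstep

-- characterisation of B's position scan
lemma pvScan_spec (f : Nat → Option (Int × Int × Int)) (n : Nat) :
    ((List.range n).foldl (fun acc i => match acc with | some r => some r | none => f i) none = none
       ↔ ∀ i < n, f i = none)
    ∧ (∀ v, (List.range n).foldl (fun acc i => match acc with | some r => some r | none => f i) none = some v →
        ∃ i < n, f i = some v ∧ ∀ j < i, f j = none) := by
  induction n with
  | zero => simp
  | succ n ih =>
    obtain ⟨ihn, ihs⟩ := ih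
    have hfold : (List.range (n + 1)).foldl
        (fun acc i => match acc with | some r => some r | none => f i) none
        = match (List.range n).foldl (fun acc i => match acc with | some r => some r | none => f i) none with
          | some r => some r
          | none => f n := by
      rw [List.range_succ, List.foldl_append]; rfl
    rcases hr : (List.range n).foldl (fun acc i => match acc with | some r => some r | none => f i) none with _ | v0
    · rw [hr] at hfold
      constructor
      · rw [hfold]
        constructor
        · intro h i hi
          rcases Nat.lt_succ_iff_lt_or_eq.mp hi with h' | h'
          · exact ihn.mp hr i h'
          · rw [h']; exact h
        · intro h; exact h n (Nat.lt_succ_self n)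
      · intro v heq
        rw [hfold] at heq
        exact ⟨n, Nat.lt_succ_self n, heq, fun j hj => ihn.mp hr j hj⟩
    · rw [hr] at hfold
      constructor
      · rw [hfold]
        constructor
        · intro h; cases h
        · intro h
          have : (List.range n).foldl (fun acc i => match acc with | some r => some r | none => f i) none = none :=
            ihn.mpr (fun i hi => h i (Nat.lt_succ_of_lt hi))
          rw [this] at hr; cases hr
      · intro v heq
        rw [hfold] at heq
        obtain ⟨i, hi, hfi, hbefore⟩ := ihs v0 hr
        cases heq
        exact ⟨i, Nat.lt_succ_of_lt hi, hfi, hbefore⟩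

-- characterisation of findSome?: the first element producing a value
lemma pvFindSome_spec {α β : Type} (f : α → Option β) : ∀ (ps : List α) (v : β),
    ps.findSome? f = some v →
    ∃ k, ∃ hk : k < ps.length, f ps[k] = some v ∧ ∀ q ∈ ps.take k, f q = none := by
  intro ps
  induction ps with
  | nil => intro v h; cases h
  | cons a t ih =>
    intro v h
    rw [List.findSome?_cons] at h
    rcases hfa : f a with _ | w
    · rw [hfa] at h
      obtain ⟨k, hk, hfk, htake⟩ := ih v h
      refine ⟨k + 1, by simpa using hk, by simpa using hfk, ?_⟩
      intro q hq
      rcases List.mem_cons.mp (by simpa [List.take_succ_cons] using hq) with h' | h'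
      · rw [h']; exact hfa
      · exact htake q h'
    · rw [hfa] at h
      cases h
      exact ⟨0, by simp, by simpa using hfa, by simp⟩

-- A and B search for the same set of pattern strings
lemma pvSameStrings₁ : ∀ pm ∈ pvPatternsA, pm.1 ∈ pvPatternsB.map Prod.fst := by decide
lemma pvSameStrings₂ : ∀ pm ∈ pvPatternsB, pm.1 ∈ pvPatternsA.map Prod.fst := by decide
-- in A's list, a strict prefix of a pattern is always preceded by that pattern
lemma pvOrderA : ∀ k, ∀ hk : k < pvPatternsA.length, ∀ qm ∈ pvPatternsA,
    pvPatternsA[k].1 <+: qm.1 → pvPatternsA[k].1 ≠ qm.1 →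
    qm.1 ∈ (pvPatternsA.take k).map Prod.fst := by decide
-- in B's list, an earlier pattern is never a strict prefix of a later one
lemma pvOrderB : ∀ j, ∀ hj : j < pvPatternsB.length, ∀ k, ∀ hk : k < pvPatternsB.length,
    j < k → pvPatternsB[j].1 <+: pvPatternsB[k].1 → pvPatternsB[j].1 = pvPatternsB[k].1 := by decide
-- a pattern string determines its month number
lemma pvSameMonth : ∀ pm ∈ pvPatternsA, ∀ qm ∈ pvPatternsB, pm.1 = qm.1 → pm.2 = qm.2 := by decide
lemma pvNonEmptyA : ∀ pm ∈ pvPatternsA, pm.1 ≠ [] := by decide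

-- a match at position j bounds find from above (and find is then a genuine position)
lemma pvFind_le_of_prefix_drop (l p : List Char) (j : Nat) (h : p <+: l.drop j) :
    0 ≤ PySem.Chars.find l p ∧ (PySem.Chars.find l p).toNat ≤ j := by
  have hinf : p <:+: l := h.isInfix.trans (List.drop_suffix j l).isInfix
  have h0 : 0 ≤ PySem.Chars.find l p := (PySem.Chars.find_nonneg_iff l p).mpr hinf
  refine ⟨h0, ?_⟩
  by_contra hlt
  exact ((PySem.Chars.find_spec h0).2 j (by omega)) h

-- the heart of the equivalence: on any haystack the two loops return the same result
lemma pvMain (l : List Char) :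
    (pvPatternsA.foldl (pvStep l) none) =
    (List.range l.length).foldl (fun acc i => match acc with | some r => some r | none => pvFirstAt l i) none := by
  obtain ⟨hAn, hAs⟩ := pvFold_spec l pvPatternsA
  obtain ⟨hSn, hSs⟩ := pvScan_spec (pvFirstAt l) l.length
  -- a pattern of B matching at position j makes the scan's inner loop fire there
  have hFA_ne : ∀ (j : Nat), ∀ pm ∈ pvPatternsB, pm.1 <+: l.drop j → pvFirstAt l j ≠ none := by
    intro j pm hmem hpfx hnone
    rw [pvFirstAt, List.findSome?_eq_none_iff] at hnone
    have := hnone pm hmem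
    rw [if_pos ((PySem.Chars.startswith_iff _ _).mpr hpfx)] at this
    cases this
  rcases hA : pvPatternsA.foldl (pvStep l) none with _ | v
  · -- A finds nothing: no pattern occurs anywhere, so the scan finds nothing either
    have hall := hAn.mp hA
    symm
    rw [hSn]
    intro j hj
    rw [pvFirstAt, List.findSome?_eq_none_iff]
    intro pm hmem
    rcases hsw : PySem.Chars.startswith (l.drop j) pm.1 with _ | _
    · rw [if_neg (by simp)]
    · exfalso
      have hpfx := (PySem.Chars.startswith_iff _ _).mp hsw
      obtain ⟨qm, hqm, hqe⟩ := List.mem_map.mp (pvSameStrings₂ pm hmem)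
      have : PySem.Chars.find l qm.1 ≠ -1 := by
        rw [PySem.Chars.find_ne_neg_one_iff, hqe]
        exact hpfx.isInfix.trans (List.drop_suffix j l).isInfix
      exact this (hall qm hqm)
  · obtain ⟨m, i, e⟩ := v
    obtain ⟨k, hk, hkm, hkf, hkne, hke, hmin, htake⟩ := hAs m i e hA
    have hgeA := PySem.Chars.neg_one_le_find l pvPatternsA[k].1
    have hi0 : 0 ≤ i := by omega
    have hkmem : pvPatternsA[k] ∈ pvPatternsA := List.getElem_mem hk
    have hfge : 0 ≤ PySem.Chars.find l pvPatternsA[k].1 := by omega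
    have hpfx : pvPatternsA[k].1 <+: l.drop i.toNat := by
      have := (PySem.Chars.find_spec hfge).1
      rwa [hkf] at this
    obtain ⟨pB0, hpB0, hpB0e⟩ := List.mem_map.mp (pvSameStrings₁ pvPatternsA[k] hkmem)
    have hlen : i.toNat < l.length := by
      by_contra hc
      have : l.drop i.toNat = [] := List.drop_eq_nil_of_le (by omega)
      rw [this] at hpfx
      exact pvNonEmptyA pvPatternsA[k] hkmem (List.prefix_nil.mp hpfx)
    -- the scan cannot come back empty
    rcases hS : (List.range l.length).foldl
        (fun acc i => match acc with | some r => some r | none => pvFirstAt l i) none with _ | v'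
    · exfalso
      exact hFA_ne i.toNat pB0 hpB0 (by rwa [hpB0e]) (hSn.mp hS i.toNat hlen)
    · obtain ⟨iB, hiB, hfiB, hbef⟩ := hSs v' hS
      obtain ⟨kB, hkB, hfkB, htakeB⟩ := pvFindSome_spec _ pvPatternsB v' hfiB
      rcases hsw : PySem.Chars.startswith (l.drop iB) pvPatternsB[kB].1 with _ | _
      · rw [if_neg (by rw [hsw]; simp)] at hfkB
        cases hfkB
      · rw [if_pos hsw] at hfkB
        have hpfxB : pvPatternsB[kB].1 <+: l.drop iB := (PySem.Chars.startswith_iff _ _).mp hsw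
        have hkBmem : pvPatternsB[kB] ∈ pvPatternsB := List.getElem_mem hkB
        -- the scan position equals A's best start
        have hle1 : iB ≤ i.toNat := by
          by_contra hc
          exact hFA_ne i.toNat pB0 hpB0 (by rwa [hpB0e]) (hbef i.toNat (by omega))
        have hle2 : i ≤ (iB : Int) := by
          obtain ⟨qm, hqm, hqe⟩ := List.mem_map.mp (pvSameStrings₂ pvPatternsB[kB] hkBmem)
          obtain ⟨hq0, hqle⟩ := pvFind_le_of_prefix_drop l qm.1 iB (by rwa [hqe])
          have := hmin qm hqm (by omega)
          omega
        have hieq : i = (iB : Int) := by omega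
        have hieq' : i.toNat = iB := by omega
        -- the chosen pattern strings coincide
        have heqs : pvPatternsA[k].1 = pvPatternsB[kB].1 := by
          have hpfxB' : pvPatternsB[kB].1 <+: l.drop i.toNat := by rwa [hieq']
          rcases List.prefix_or_prefix_of_prefix hpfx hpfxB' with hAB | hBA
          · by_contra hne
            obtain ⟨qm, hqm, hqe⟩ := List.mem_map.mp (pvSameStrings₂ pvPatternsB[kB] hkBmem)
            have hord := pvOrderA k hk qm hqm (by rwa [hqe]) (by rw [hqe]; exact hne)
            obtain ⟨q', hq', hq'e⟩ := List.mem_map.mp hord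
            have hq'mem : q' ∈ pvPatternsA := (List.take_sublist k pvPatternsA).mem hq'
            obtain ⟨hf0, hfle⟩ := pvFind_le_of_prefix_drop l q'.1 i.toNat
              (by rw [hq'e, hqe]; exact hpfxB')
            have := hmin q' hq'mem (by omega)
            exact htake q' hq' (by omega)
          · by_contra hne
            obtain ⟨qm, hqm, hqe⟩ := List.mem_map.mp (pvSameStrings₁ pvPatternsA[k] hkmem)
            obtain ⟨jB, hjB, hjBe⟩ := List.mem_iff_getElem.mp hqm
            rcases lt_trichotomy jB kB with hlt | heq | hgt
            · have hmemtake : pvPatternsB[jB] ∈ pvPatternsB.take kB := by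
                have : (pvPatternsB.take kB)[jB]'(by simp; omega) = pvPatternsB[jB] :=
                  List.getElem_take
                rw [← this]; exact List.getElem_mem _
              have := htakeB pvPatternsB[jB] hmemtake
              rw [if_pos ((PySem.Chars.startswith_iff _ _).mpr
                (by rw [hjBe, hqe, ← hieq']; exact hpfx))] at this
              cases this
            · subst heq
              exact hne ((congrArg Prod.fst hjBe).trans hqe).symm
            · have := pvOrderB kB hkB jB hjB hgt (by rw [hjBe, hqe]; exact hBA)
              rw [hjBe, hqe] at this
              exact hne this.symm
        -- months and spans coincide
        have hmon : pvPatternsA[k].2 = pvPatternsB[kB].2 :=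
          pvSameMonth pvPatternsA[k] hkmem pvPatternsB[kB] hkBmem heqs
        rw [hS, ← hfkB]
        simp only [Option.some.injEq, Prod.mk.injEq]
        refine ⟨by rw [← hkm, hmon], by rw [hieq], ?_⟩
        rw [hke, heqs, hieq]

-- ===== VERDICT (by name: the statement is the Claim_ definition above) =====
theorem detect_month_in_text_py_spec : Claim_equal_detect_month_in_text_py := by
  intro text _
  unfold Spec_detect_month_in_text_py detect_month_in_text_py detect_month_in_text_py_alt
  by_cases h : text.toList = []
  · simp [h]
  · simp only [h, if_false]
    rw [pvFoldA_eq (PySem.Chars.lower text.toList) pvPatternsA none PySem.Set.empty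
      (by intro sp hsp; cases hsp)]
    exact pvMain (PySem.Chars.lower text.toList)
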